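-- pv_equiv track=rewrite | github.com/KostyaRazboynik/CT-ITMO-y2021 | secnod term/dm-labs/F.py | Check
-- ===== SOURCE A (Python) =====
-- def xor(a, b):
--     return a ^ b
--
-- def Check(a, b, used, arr, arr2, mas, mas2):
--     if used[a]:
--         return True
--     used[a] = 1
--     if xor(arr[a], arr2[b]):
--         return False
--     for i in range(26):
--         A = mas[a][i]
--         B = mas2[b][i]
--
--         if xor(A == 0, B == 0):
--             return False
--         if not used[A]:
--             if not Check(A, B, used, arr, arr2, mas, mas2):
--                 return False
--     return True
-- ===== SOURCE B (Python) =====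
-- def Check(a, b, used, arr, arr2, mas, mas2):
--     # Iterative DFS with an explicit stack of suspended frames (a0, b0, next child index),
--     # replacing A's recursion; same visit order and entry-time marking of `used`.
--     if used[a]:
--         return True
--     used[a] = 1
--     if arr[a] != arr2[b]:
--         return False
--     stack = []
--     a0, b0, i = a, b, 0
--     while True:
--         if i < 26:
--             A = mas[a0][i]
--             B = mas2[b0][i]
--             if (A == 0) != (B == 0):
--                 return False
--             if not used[A]:
--                 used[A] = 1
--                 if arr[A] != arr2[B]:
--                     return False
--                 stack.append((a0, b0, i + 1))
--                 a0, b0, i = A, B, 0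
--             else:
--                 i += 1
--         else:
--             if not stack:
--                 return True
--             a0, b0, i = stack.pop()
-- ===== Notes on version B (the rewrite author's own statement) =====
-- stated objective: alternative
-- what changed: replaces A's recursive DFS with an iterative DFS driven by an explicit stack of (node, partner, next-child-index) frames, preserving A's child visit order and entry-time marking of used
import Mathlib
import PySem

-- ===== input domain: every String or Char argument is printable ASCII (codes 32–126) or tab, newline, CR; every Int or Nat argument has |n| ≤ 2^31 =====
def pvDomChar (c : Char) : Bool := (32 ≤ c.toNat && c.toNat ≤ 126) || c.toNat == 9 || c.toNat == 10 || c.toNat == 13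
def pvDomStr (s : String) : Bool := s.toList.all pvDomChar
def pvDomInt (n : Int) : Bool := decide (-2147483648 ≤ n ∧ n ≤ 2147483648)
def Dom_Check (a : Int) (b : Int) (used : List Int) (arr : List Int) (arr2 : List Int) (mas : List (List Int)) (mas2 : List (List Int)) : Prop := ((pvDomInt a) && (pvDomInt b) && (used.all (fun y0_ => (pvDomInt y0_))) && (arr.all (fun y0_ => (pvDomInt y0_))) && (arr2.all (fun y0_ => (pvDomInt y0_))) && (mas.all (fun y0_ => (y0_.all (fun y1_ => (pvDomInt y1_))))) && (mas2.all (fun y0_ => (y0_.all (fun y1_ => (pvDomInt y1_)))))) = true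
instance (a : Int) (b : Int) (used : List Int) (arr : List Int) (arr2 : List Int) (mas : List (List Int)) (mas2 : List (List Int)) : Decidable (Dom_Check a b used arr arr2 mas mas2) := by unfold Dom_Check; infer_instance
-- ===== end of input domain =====

-- B rewrites A's recursive DFS as an iterative DFS with an explicit stack of suspended
-- frames (same visit order, entry-time marking); return values agree, and both versions
-- mutate `used` in place identically (the theorems below are about the return value).

-- number of unvisited (zero) entries of `used` — termination measure for both ports
def pvZeros (xs : List Int) : Nat := xs.countP (fun x => x == 0)

-- mas[x][i] (two chained Python subscripts)
def pvChild? (m : List (List Int)) (x : Int) (i : Nat) : Option Int :=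
  (PySem.List.pyGet? m x).bind (fun row => PySem.List.pyGet? row (i : Int))

-- termination lemma cited by the ports: setting a zero entry to 1 decreases pvZeros
theorem pvZeros_set_lt (xs : List Int) (i : Int) (ys : List Int)
    (hg : PySem.List.pyGet? xs i = some 0) (hs : PySem.List.pySet? xs i 1 = some ys) :
    pvZeros ys < pvZeros xs := by
  unfold PySem.List.pyGet? at hg
  unfold PySem.List.pySet? at hs
  cases hk : PySem.List.pyIdx? xs.length i with
  | none => rw [hk] at hg; simp at hg
  | some k =>
    rw [hk] at hg hs
    simp at hg hs
    have hlt : k < xs.length := by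
      by_contra hge
      rw [List.getElem?_eq_none (by omega)] at hg
      simp at hg
    have hx : xs[k] = 0 := by
      rw [List.getElem?_eq_getElem hlt] at hg
      simpa using hg
    subst hs
    unfold pvZeros
    rw [List.countP_set hlt]
    simp only [hx, show ((0:Int) == 0) = true by decide, show ((1:Int) == 0) = false by decide,
      if_true]
    norm_num
    exact hx ▸ List.getElem_mem hlt

-- ===== PORT A =====
-- `checkA fuel …` is the literal body of Python's Check (fuel only bounds the recursion
-- depth; used.length + 1 is always enough); `loopA` is its `for i in range(26)` loop.
mutual
def checkA (fuel : Nat) (a b : Int) (used arr arr2 : List Int) (mas mas2 : List (List Int)) : Option (Bool × List Int) :=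
  match fuel with
  | 0 => none
  | f + 1 =>
    match PySem.List.pyGet? used a with                     -- if used[a]: return True
    | none => none
    | some u =>
      if u ≠ 0 then some (true, used)
      else
        match PySem.List.pySet? used a 1 with               -- used[a] = 1
        | none => none
        | some used1 =>
          match PySem.List.pyGet? arr a, PySem.List.pyGet? arr2 b with
          | some x, some y =>
            if Int.xor x y ≠ 0 then some (false, used1)     -- if xor(arr[a], arr2[b]): return False
            else loopA f a b 0 used1 arr arr2 mas mas2
          | _, _ => none
  termination_by (fuel, 0)

def loopA (f : Nat) (a b : Int) (i : Nat) (used arr arr2 : List Int) (mas mas2 : List (List Int)) : Option (Bool × List Int) :=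
  if h : i < 26 then
    match pvChild? mas a i, pvChild? mas2 b i with          -- A = mas[a][i]; B = mas2[b][i]
    | some A, some B =>
      if (decide (A = 0)).xor (decide (B = 0)) then some (false, used)   -- if xor(A == 0, B == 0): return False
      else
        match PySem.List.pyGet? used A with                 -- if not used[A]:
        | none => none
        | some uA =>
          if uA = 0 then
            match checkA f A B used arr arr2 mas mas2 with  -- if not Check(A, B, …): return False
            | none => none
            | some (r, u') =>
              if r then loopA f a b (i + 1) u' arr arr2 mas mas2 else some (false, u')
          else loopA f a b (i + 1) used arr arr2 mas mas2
    | _, _ => none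
  else some (true, used)                                     -- return True
  termination_by (f, 27 - i)
end

def Check (a : Int) (b : Int) (used : List Int) (arr : List Int) (arr2 : List Int) (mas : List (List Int)) (mas2 : List (List Int)) : Bool :=
  match checkA (used.length + 1) a b used arr arr2 mas mas2 with
  | some (r, _) => r
  | none => false        -- unreachable under Pre_Check (Python raises there)

-- ===== PORT B =====
-- machine of Source B: current frame (a0, b0, i) plus the explicit stack of suspended frames
def runB (stack : List (Int × Int × Nat)) (a0 b0 : Int) (i : Nat) (used arr arr2 : List Int) (mas mas2 : List (List Int)) : Option (Bool × List Int) :=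
  if h : i < 26 then
    match pvChild? mas a0 i, pvChild? mas2 b0 i with        -- A = mas[a0][i]; B = mas2[b0][i]
    | some A, some B =>
      if decide (A = 0) != decide (B = 0) then some (false, used)   -- if (A == 0) != (B == 0): return False
      else
        match hA : PySem.List.pyGet? used A with            -- if not used[A]:
        | none => none
        | some uA =>
          if huA : uA = 0 then
            match hS : PySem.List.pySet? used A 1 with      -- used[A] = 1
            | none => none
            | some used1 =>
              match PySem.List.pyGet? arr A, PySem.List.pyGet? arr2 B with
              | some x, some y =>
                if x ≠ y then some (false, used1)           -- if arr[A] != arr2[B]: return False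
                else runB ((a0, b0, i + 1) :: stack) A B 0 used1 arr arr2 mas mas2   -- push, descend
              | _, _ => none
          else runB stack a0 b0 (i + 1) used arr arr2 mas mas2
    | _, _ => none
  else
    match stack with
    | [] => some (true, used)                                -- return True
    | (a1, b1, i1) :: rest => runB rest a1 b1 i1 used arr arr2 mas mas2   -- pop
  termination_by (pvZeros used, stack.length, 27 - i)
  decreasing_by
  · exact Prod.Lex.left _ _ (pvZeros_set_lt used A used1 (huA ▸ hA) hS)
  · exact Prod.Lex.right _ (Prod.Lex.right _ (by omega))
  · exact Prod.Lex.right _ (Prod.Lex.left _ _ (by simp))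

def Check_alt (a : Int) (b : Int) (used : List Int) (arr : List Int) (arr2 : List Int) (mas : List (List Int)) (mas2 : List (List Int)) : Bool :=
  match PySem.List.pyGet? used a with                        -- if used[a]: return True
  | none => false
  | some u =>
    if u ≠ 0 then true
    else
      match PySem.List.pySet? used a 1 with                  -- used[a] = 1
      | none => false
      | some used1 =>
        match PySem.List.pyGet? arr a, PySem.List.pyGet? arr2 b with
        | some x, some y =>
          if x ≠ y then false                                -- if arr[a] != arr2[b]: return False
          else
            match runB [] a b 0 used1 arr arr2 mas mas2 with
            | some (r, _) => r
            | none => false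
        | _, _ => false

-- ===== PRECONDITION & SPEC =====
-- Pre_Check admits the runs of A that provably never index out of range: either A exits
-- before its loop (used[a] truthy, or a root label mismatch), or the whole structure is
-- well formed (index arguments and all mas/mas2 entries are valid indices, rows of width
-- 26, matching lengths).  This is narrower than "A returns": A also returns when an
-- out-of-range entry sits in a part of the structure its traversal happens not to reach
-- (see claim.json "cites"); such inputs are excluded.
def Pre_Check (a : Int) (b : Int) (used : List Int) (arr : List Int) (arr2 : List Int) (mas : List (List Int)) (mas2 : List (List Int)) : Prop :=
  (PySem.Raise.InRange used.length a ∧ PySem.List.pyGetD used a 0 ≠ 0) ∨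
  (PySem.Raise.InRange used.length a ∧ PySem.List.pyGetD used a 1 = 0 ∧
   PySem.Raise.InRange arr.length a ∧ PySem.Raise.InRange arr2.length b ∧
   PySem.List.pyGetD arr a 0 ≠ PySem.List.pyGetD arr2 b 0) ∨
  (PySem.Raise.InRange used.length a ∧ PySem.Raise.InRange arr2.length b ∧
   arr.length = used.length ∧ mas.length = used.length ∧ mas2.length = arr2.length ∧
   (∀ row ∈ mas, row.length = 26 ∧ ∀ x ∈ row, PySem.Raise.InRange used.length x) ∧
   (∀ row ∈ mas2, row.length = 26 ∧ ∀ x ∈ row, PySem.Raise.InRange arr2.length x))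

instance (a : Int) (b : Int) (used : List Int) (arr : List Int) (arr2 : List Int) (mas : List (List Int)) (mas2 : List (List Int)) : Decidable (Pre_Check a b used arr arr2 mas mas2) := by unfold Pre_Check; infer_instance

def pvWitness_Check : Int × Int × List Int × List Int × List Int × List (List Int) × List (List Int) :=
  (0, 0, [0], [5], [5], [List.replicate 26 0], [List.replicate 26 0])

def Spec_Check (a : Int) (b : Int) (used : List Int) (arr : List Int) (arr2 : List Int) (mas : List (List Int)) (mas2 : List (List Int)) (out : Bool) : Prop := out = Check_alt a b used arr arr2 mas mas2
instance (a : Int) (b : Int) (used : List Int) (arr : List Int) (arr2 : List Int) (mas : List (List Int)) (mas2 : List (List Int)) (out : Bool) : Decidable (Spec_Check a b used arr arr2 mas mas2 out) := by unfold Spec_Check; infer_instance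

-- ===== CLAIM (what is proved, stated in full; the proofs are below) =====
def Claim_equal_Check : Prop := ∀ (a : Int) (b : Int) (used : List Int) (arr : List Int) (arr2 : List Int) (mas : List (List Int)) (mas2 : List (List Int)), Dom_Check a b used arr arr2 mas mas2 → Pre_Check a b used arr arr2 mas mas2 → Spec_Check a b used arr arr2 mas mas2 (Check a b used arr arr2 mas mas2)

-- ===== LEMMAS AND PROOFS =====

theorem int_xor_eq_zero (x y : Int) : (Int.xor x y = 0) ↔ x = y := by
  cases x <;> cases y <;> simp [Int.xor, Nat.xor_eq_zero_iff]

theorem pvZeros_pos (xs : List Int) (i : Int) (hg : PySem.List.pyGet? xs i = some 0) :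
    1 ≤ pvZeros xs := by
  have hm : (0 : Int) ∈ xs := PySem.List.mem_of_pyGet?_eq_some xs hg
  unfold pvZeros
  exact List.countP_pos_iff.mpr ⟨0, hm, by simp⟩

-- pvZeros never increases along loopA (the callee only turns zeros into ones)
theorem loopA_zeros : ∀ (n f : Nat) (a b : Int) (i : Nat) (used arr arr2 : List Int)
    (mas mas2 : List (List Int)) (r : Bool) (u : List Int),
    28 * f + (27 - i) ≤ n →
    loopA f a b i used arr arr2 mas mas2 = some (r, u) → pvZeros u ≤ pvZeros used := by
  intro n
  induction n using Nat.strong_induction_on with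
  | _ n IH =>
  intro f a b i used arr arr2 mas mas2 r u hn hl
  rw [loopA] at hl
  by_cases hi : i < 26
  · rw [dif_pos hi] at hl
    cases hc1 : pvChild? mas a i with
    | none => simp only [hc1] at hl; cases hl
    | some A =>
    cases hc2 : pvChild? mas2 b i with
    | none => simp only [hc1, hc2] at hl; cases hl
    | some B =>
    simp only [hc1, hc2] at hl
    by_cases hmz : ((decide (A = 0)).xor (decide (B = 0))) = true
    · rw [if_pos hmz] at hl
      simp only [Option.some.injEq, Prod.mk.injEq] at hl
      rw [← hl.2]
    · rw [if_neg hmz] at hl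
      cases hA : PySem.List.pyGet? used A with
      | none => simp only [hA] at hl; cases hl
      | some uA =>
      simp only [hA] at hl
      by_cases hz : uA = 0
      · rw [if_pos hz] at hl
        subst hz
        cases hck : checkA f A B used arr arr2 mas mas2 with
        | none => simp only [hck] at hl; cases hl
        | some p =>
        obtain ⟨r1, u'⟩ := p
        simp only [hck] at hl
        have hu' : pvZeros u' ≤ pvZeros used := by
          cases f with
          | zero => rw [checkA] at hck; simp at hck
          | succ g =>
            rw [checkA] at hck
            simp only [hA, ne_eq, not_true_eq_false, if_false, reduceIte] at hck
            cases hS : PySem.List.pySet? used A 1 with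
            | none => simp only [hS] at hck; cases hck
            | some used1 =>
            have hlt1 : pvZeros used1 < pvZeros used := pvZeros_set_lt used A used1 hA hS
            simp only [hS] at hck
            cases hx1 : PySem.List.pyGet? arr A with
            | none => simp only [hx1] at hck; cases hck
            | some x =>
            cases hy1 : PySem.List.pyGet? arr2 B with
            | none => simp only [hx1, hy1] at hck; cases hck
            | some y =>
            simp only [hx1, hy1] at hck
            by_cases hm : Int.xor x y ≠ 0
            · rw [if_pos hm] at hck
              simp only [Option.some.injEq, Prod.mk.injEq] at hck
              rw [← hck.2]
              exact le_of_lt hlt1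
            · rw [if_neg hm] at hck
              have hrec := IH (28 * g + 27) (by omega) g A B 0 used1 arr arr2 mas mas2 r1 u'
                (by omega) hck
              exact le_trans hrec (le_of_lt hlt1)
        cases r1 with
        | false =>
          simp only [if_false, Bool.false_eq_true, reduceIte, Option.some.injEq,
            Prod.mk.injEq] at hl
          rw [← hl.2]
          exact hu'
        | true =>
          simp only [if_true, reduceIte] at hl
          have hrec := IH (28 * f + (26 - i)) (by omega) f a b (i + 1) u' arr arr2 mas mas2 r u
            (by omega) hl
          exact le_trans hrec hu'
      · rw [if_neg hz] at hl
        exact IH (28 * f + (26 - i)) (by omega) f a b (i + 1) used arr arr2 mas mas2 r u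
          (by omega) hl
  · rw [dif_neg hi] at hl
    simp only [Option.some.injEq, Prod.mk.injEq] at hl
    rw [← hl.2]

-- continuation applied to loopA's outcome: what runB does once the current frame finishes
def contB (stack : List (Int × Int × Nat)) (arr arr2 : List Int) (mas mas2 : List (List Int)) : Bool × List Int → Option (Bool × List Int) :=
  fun ru =>
    if ru.1 then
      match stack with
      | [] => some (true, ru.2)
      | (a1, b1, i1) :: rest => runB rest a1 b1 i1 ru.2 arr arr2 mas mas2
    else some (false, ru.2)

-- the machine of B equals A's loop followed by the pending continuations
theorem runB_eq : ∀ (n : Nat) (stack : List (Int × Int × Nat)) (a0 b0 : Int) (i : Nat)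
    (used arr arr2 : List Int) (mas mas2 : List (List Int)) (f : Nat),
    56 * pvZeros used + 28 * stack.length + (27 - i) ≤ n →
    pvZeros used ≤ f →
    runB stack a0 b0 i used arr arr2 mas mas2 =
      (loopA f a0 b0 i used arr arr2 mas mas2).bind (contB stack arr arr2 mas mas2) := by
  intro n
  induction n using Nat.strong_induction_on with
  | _ n IH =>
  intro stack a0 b0 i used arr arr2 mas mas2 f hn hf
  rw [runB.eq_def, loopA]
  by_cases hi : i < 26
  · rw [dif_pos hi, dif_pos hi]
    cases hc1 : pvChild? mas a0 i with
    | none => simp only [hc1, Option.bind]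
    | some A =>
    cases hc2 : pvChild? mas2 b0 i with
    | none => simp only [hc1, hc2, Option.bind]
    | some B =>
    simp only [hc1, hc2]
    have hbe : (decide (A = 0) != decide (B = 0)) = ((decide (A = 0)).xor (decide (B = 0))) := by
      cases hda : decide (A = 0) <;> cases hdb : decide (B = 0) <;> rfl
    rw [hbe]
    by_cases hmz : ((decide (A = 0)).xor (decide (B = 0))) = true
    · rw [if_pos hmz, if_pos hmz]
      simp [contB]
    · rw [if_neg hmz, if_neg hmz]
      cases hA : PySem.List.pyGet? used A with
      | none => simp only [hA, Option.bind]
      | some uA =>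
      simp only [hA]
      by_cases hz : uA = 0
      · rw [dif_pos hz, if_pos hz]
        subst hz
        have hp1 : 1 ≤ pvZeros used := pvZeros_pos used A hA
        cases f with
        | zero => omega
        | succ g =>
        rw [checkA]
        simp only [hA, ne_eq, not_true_eq_false, if_false, reduceIte]
        cases hS : PySem.List.pySet? used A 1 with
        | none => simp only [hS, Option.bind]
        | some used1 =>
        have hlt1 : pvZeros used1 < pvZeros used := pvZeros_set_lt used A used1 hA hS
        simp only [hS]
        cases hx1 : PySem.List.pyGet? arr A with
        | none => simp only [hx1, Option.bind]
        | some x =>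
        cases hy1 : PySem.List.pyGet? arr2 B with
        | none => simp only [hx1, hy1, Option.bind]
        | some y =>
        simp only [hx1, hy1]
        by_cases hm : x = y
        · rw [if_neg (by simp [hm]), if_neg (by simp [int_xor_eq_zero, hm])]
          rw [IH (56 * pvZeros used1 + 28 * (stack.length + 1) + 27) (by omega)
            ((a0, b0, i + 1) :: stack) A B 0 used1 arr arr2 mas mas2 g (by simp only [List.length_cons]; omega) (by omega)]
          cases hres : loopA g A B 0 used1 arr arr2 mas mas2 with
          | none => simp only [Option.bind]
          | some p =>
          obtain ⟨r', u'⟩ := p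
          have hzu' : pvZeros u' ≤ pvZeros used1 :=
            loopA_zeros (28 * g + 27) g A B 0 used1 arr arr2 mas mas2 r' u' (le_refl _) hres
          cases r' with
          | false => simp [contB]
          | true =>
            simp only [Option.bind, contB, if_true, reduceIte]
            rw [IH (56 * pvZeros u' + 28 * stack.length + (26 - i)) (by omega)
              stack a0 b0 (i + 1) u' arr arr2 mas mas2 (g + 1) (by omega) (by omega)]
            rfl
        · rw [if_pos (by simp [hm]), if_pos (by simp [int_xor_eq_zero, hm])]
          simp [contB]
      · rw [dif_neg hz, if_neg hz]
        exact IH (56 * pvZeros used + 28 * stack.length + (26 - i)) (by omega)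
          stack a0 b0 (i + 1) used arr arr2 mas mas2 f (by omega) hf
  · rw [dif_neg hi, dif_neg hi]
    cases stack with
    | nil => simp [contB]
    | cons fr rest =>
      obtain ⟨a1, b1, i1⟩ := fr
      simp [contB]

theorem check_eq_alt (a : Int) (b : Int) (used : List Int) (arr : List Int) (arr2 : List Int) (mas : List (List Int)) (mas2 : List (List Int)) :
    Check a b used arr arr2 mas mas2 = Check_alt a b used arr arr2 mas mas2 := by
  unfold Check Check_alt
  rw [checkA]
  cases hg : PySem.List.pyGet? used a with
  | none => simp only [hg]
  | some u =>
  simp only [hg]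
  by_cases hu : u ≠ 0
  · rw [if_pos hu, if_pos hu]
  · rw [if_neg hu, if_neg hu]
    cases hS : PySem.List.pySet? used a 1 with
    | none => simp only [hS]
    | some used1 =>
    simp only [hS]
    have hlen : used1.length = used.length := by
      unfold PySem.List.pySet? at hS
      cases hk : PySem.List.pyIdx? used.length a with
      | none => rw [hk] at hS; cases hS
      | some k => rw [hk] at hS; simp at hS; rw [← hS]; simp
    cases hx1 : PySem.List.pyGet? arr a with
    | none => simp only [hx1]
    | some x =>
    cases hy1 : PySem.List.pyGet? arr2 b with
    | none => simp only [hx1, hy1]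
    | some y =>
    simp only [hx1, hy1]
    by_cases hm : x = y
    · rw [if_neg (by simp [int_xor_eq_zero, hm]), if_neg (by simp [hm])]
      have hz1 : pvZeros used1 ≤ used.length := by
        have := List.countP_le_length (p := fun z : Int => z == 0) (l := used1)
        unfold pvZeros
        omega
      rw [runB_eq (56 * pvZeros used1 + 27) [] a b 0 used1 arr arr2 mas mas2
        used.length (by simp only [List.length_nil]; omega) hz1]
      cases hres : loopA used.length a b 0 used1 arr arr2 mas mas2 with
      | none => simp only [Option.bind]
      | some p =>
      obtain ⟨r, w⟩ := p
      cases r <;> simp [contB]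
    · rw [if_pos (by simp [int_xor_eq_zero, hm]), if_pos (by simp [hm])]

-- ===== VERDICT (by name: the statement is the Claim_ definition above) =====
theorem Check_spec : Claim_equal_Check := by
  intro a b used arr arr2 mas mas2 _ _
  unfold Spec_Check
  exact check_eq_alt a b used arr arr2 mas mas2
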